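-- pv_equiv track=rewrite | github.com/pradeepappala/practice_python | HackerRank/truck_tour.py | truckTour
-- ===== SOURCE A (Python) =====
-- def truckTour(petrolpumps):
--     total_fuel = sum([i[0] for i in petrolpumps])
--     total_distance = sum([i[1] for i in petrolpumps])
--
--     # failure case
--     if total_fuel < total_distance:
--         return -1
--
--     size = 0
--     start_index = 0
--     curr_index = 0
--     curr_fuel = 0
--     curr_distance = 0
--     while size < len(petrolpumps):
--         if curr_fuel < curr_distance:
--             # if cummilative sum of fuel is less than distance
--             # remove first element and increase index by 1
--             curr_fuel -= petrolpumps[start_index][0]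
--             curr_distance -= petrolpumps[start_index][1]
--             start_index += 1
--             size -= 1
--         else:
--             # cummilative sum
--             curr_fuel += petrolpumps[curr_index][0]
--             curr_distance += petrolpumps[curr_index][1]
--             curr_index += 1
--             curr_index = curr_index % len(petrolpumps)
--             size += 1
--
--     return start_index
-- ===== SOURCE B (Python) =====
-- def truckTour(petrolpumps):
--     total_fuel = sum([i[0] for i in petrolpumps])
--     total_distance = sum([i[1] for i in petrolpumps])
--     if total_fuel < total_distance:
--         return -1
--     start = 0
--     tank = 0
--     for i, pump in enumerate(petrolpumps):
--         tank += pump[0] - pump[1]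
--         if tank < 0:
--             start = i + 1
--             tank = 0
--     return start
-- ===== Notes on version B (the rewrite author's own statement) =====
-- stated objective: idiomatic
-- what changed: Replaced A's sliding-window while-loop (five mutable state variables, window shrunk element by element from the front and a wrap past the end via modular indexing) by the textbook single forward pass that keeps one running tank and jumps the candidate start to i+1 whenever the tank goes negative.
import Mathlib
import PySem

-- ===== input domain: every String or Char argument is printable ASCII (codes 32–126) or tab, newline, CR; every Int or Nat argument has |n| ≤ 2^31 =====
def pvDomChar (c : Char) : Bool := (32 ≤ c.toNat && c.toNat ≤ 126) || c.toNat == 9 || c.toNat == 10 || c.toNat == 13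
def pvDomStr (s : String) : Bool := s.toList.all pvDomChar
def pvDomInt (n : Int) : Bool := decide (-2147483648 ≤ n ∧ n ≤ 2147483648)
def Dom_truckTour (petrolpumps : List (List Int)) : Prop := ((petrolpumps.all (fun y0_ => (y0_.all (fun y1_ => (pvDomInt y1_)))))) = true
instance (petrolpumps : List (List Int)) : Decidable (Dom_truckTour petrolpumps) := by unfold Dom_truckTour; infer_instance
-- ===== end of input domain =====

-- ===== PORT A =====
-- B is the standard one-pass greedy for the circular-tour problem; A's sliding window is replaced
-- by a single forward scan that resets the candidate start to i+1 whenever the running tank goes negative.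
-- A-side helper: the Python while-loop, as structural recursion on a fuel counter
-- (fuel 3*len+1 is proved sufficient below; `none` would mean fuel ran out and never occurs under Pre_).
def pvTruckLoop (pp : List (List Int)) : Nat → Int → Int → Int → Int → Int → Option Int
  | 0, _, _, _, _, _ => none
  | fuel + 1, size, start, cur, cf, cd =>
    if size < (pp.length : Int) then
      if cf < cd then
        pvTruckLoop pp fuel (size - 1) (start + 1) cur
          (cf - PySem.List.pyGetD (PySem.List.pyGetD pp start []) 0 0)
          (cd - PySem.List.pyGetD (PySem.List.pyGetD pp start []) 1 0)
      else
        pvTruckLoop pp fuel (size + 1) start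
          (PySem.Int.mod (cur + 1) (pp.length : Int))
          (cf + PySem.List.pyGetD (PySem.List.pyGetD pp cur []) 0 0)
          (cd + PySem.List.pyGetD (PySem.List.pyGetD pp cur []) 1 0)
    else some start

def truckTour (petrolpumps : List (List Int)) : Int :=
  let total_fuel := (petrolpumps.map (fun i => PySem.List.pyGetD i 0 0)).sum
  let total_distance := (petrolpumps.map (fun i => PySem.List.pyGetD i 1 0)).sum
  if total_fuel < total_distance then -1
  else (pvTruckLoop petrolpumps (3 * petrolpumps.length + 1) 0 0 0 0 0).getD 0

-- ===== PORT B =====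
def truckTour_alt (petrolpumps : List (List Int)) : Int :=
  let total_fuel := (petrolpumps.map (fun i => PySem.List.pyGetD i 0 0)).sum
  let total_distance := (petrolpumps.map (fun i => PySem.List.pyGetD i 1 0)).sum
  if total_fuel < total_distance then -1
  else
    ((PySem.List.enumerate petrolpumps 0).foldl
      (fun (st : Int × Int) (ip : Int × List Int) =>
        let tank := st.2 + (PySem.List.pyGetD ip.2 0 0 - PySem.List.pyGetD ip.2 1 0)
        if tank < 0 then (ip.1 + 1, 0) else (st.1, tank))
      (0, 0)).1

-- ===== PRECONDITION & SPEC =====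
-- Pre_ excludes exactly the inputs on which Python A raises IndexError: a row shorter than 2
-- entries makes `i[0]` / `i[1]` raise. On every input with all rows of length ≥ 2, A returns.
def Pre_truckTour (petrolpumps : List (List Int)) : Prop :=
  ∀ r ∈ petrolpumps, 2 ≤ r.length
instance (petrolpumps : List (List Int)) : Decidable (Pre_truckTour petrolpumps) := by
  unfold Pre_truckTour; infer_instance
def pvWitness_truckTour : List (List Int) := [[1, 5], [10, 3], [3, 4]]
def Spec_truckTour (petrolpumps : List (List Int)) (out : Int) : Prop := out = truckTour_alt petrolpumps
instance (petrolpumps : List (List Int)) (out : Int) : Decidable (Spec_truckTour petrolpumps out) := by unfold Spec_truckTour; infer_instance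

-- ===== CLAIM (what is proved, stated in full; the proofs are below) =====
def Claim_equal_truckTour : Prop := ∀ (petrolpumps : List (List Int)), Dom_truckTour petrolpumps → Pre_truckTour petrolpumps → Spec_truckTour petrolpumps (truckTour petrolpumps)

-- ===== LEMMAS AND PROOFS =====

-- fuel/distance of pump j, and window sums over [a, b)
def pvF (pp : List (List Int)) (j : Nat) : Int := PySem.List.pyGetD (pp.getD j []) 0 0
def pvG (pp : List (List Int)) (j : Nat) : Int := PySem.List.pyGetD (pp.getD j []) 1 0
def pvSF (pp : List (List Int)) (a b : Nat) : Int := ∑ j ∈ Finset.Ico a b, pvF pp j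
def pvSG (pp : List (List Int)) (a b : Nat) : Int := ∑ j ∈ Finset.Ico a b, pvG pp j
def pvS (pp : List (List Int)) (a b : Nat) : Int := pvSF pp a b - pvSG pp a b

-- B's candidate start after scanning the first i pumps
def pvStart (pp : List (List Int)) : Nat → Nat
  | 0 => 0
  | i + 1 => if pvS pp (pvStart pp i) (i + 1) < 0 then i + 1 else pvStart pp i

lemma pvS_self (pp : List (List Int)) (a : Nat) : pvS pp a a = 0 := by
  simp [pvS, pvSF, pvSG]

lemma pvS_split (pp : List (List Int)) {a b c : Nat} (h1 : a ≤ b) (h2 : b ≤ c) :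
    pvS pp a b + pvS pp b c = pvS pp a c := by
  have hF := Finset.sum_Ico_consecutive (pvF pp) h1 h2
  have hG := Finset.sum_Ico_consecutive (pvG pp) h1 h2
  simp only [pvS, pvSF, pvSG]
  omega

lemma pvSF_succ_top (pp : List (List Int)) {a b : Nat} (h : a ≤ b) :
    pvSF pp a (b + 1) = pvSF pp a b + pvF pp b := by
  simp [pvSF, Finset.sum_Ico_succ_top h]

lemma pvSG_succ_top (pp : List (List Int)) {a b : Nat} (h : a ≤ b) :
    pvSG pp a (b + 1) = pvSG pp a b + pvG pp b := by
  simp [pvSG, Finset.sum_Ico_succ_top h]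

lemma pvS_succ_top (pp : List (List Int)) {a b : Nat} (h : a ≤ b) :
    pvS pp a (b + 1) = pvS pp a b + (pvF pp b - pvG pp b) := by
  simp only [pvS, pvSF_succ_top pp h, pvSG_succ_top pp h]; ring

lemma pvSF_succ_bot (pp : List (List Int)) {a b : Nat} (h : a < b) :
    pvSF pp a b - pvF pp a = pvSF pp (a + 1) b := by
  simp [pvSF, Finset.sum_eq_sum_Ico_succ_bot h]

lemma pvSG_succ_bot (pp : List (List Int)) {a b : Nat} (h : a < b) :
    pvSG pp a b - pvG pp a = pvSG pp (a + 1) b := by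
  simp [pvSG, Finset.sum_eq_sum_Ico_succ_bot h]

lemma pvStart_le (pp : List (List Int)) (i : Nat) : pvStart pp i ≤ i := by
  induction i with
  | zero => simp [pvStart]
  | succ i ih => simp only [pvStart]; split <;> omega

lemma pvStart_mono (pp : List (List Int)) {i j : Nat} (h : i ≤ j) :
    pvStart pp i ≤ pvStart pp j := by
  induction j with
  | zero =>
    have : i = 0 := by omega
    subst this; exact le_rfl
  | succ j ih =>
    rcases Nat.lt_or_ge i (j+1) with hlt | hge
    · have := ih (by omega)
      have := pvStart_le pp j
      simp only [pvStart]; split <;> omega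
    · have : i = j + 1 := by omega
      subst this; exact le_rfl

-- the two greedy invariants: every prefix of the current window is nonnegative,
-- and every window ending at the current start is negative
lemma pvStart_inv (pp : List (List Int)) (i : Nat) :
    (∀ j, pvStart pp i ≤ j → j ≤ i → 0 ≤ pvS pp (pvStart pp i) j) ∧
    (∀ j, j < pvStart pp i → pvS pp j (pvStart pp i) < 0) := by
  induction i with
  | zero =>
    constructor
    · intro j h1 h2
      have : j = 0 := by omega
      simp [pvStart, this, pvS_self]
    · intro j hj; simp [pvStart] at hj
  | succ i ih =>
    obtain ⟨ihp, ihn⟩ := ih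
    have hle := pvStart_le pp i
    by_cases hneg : pvS pp (pvStart pp i) (i + 1) < 0
    · have hs : pvStart pp (i + 1) = i + 1 := by simp [pvStart, hneg]
      rw [hs]
      constructor
      · intro j h1 h2
        have : j = i + 1 := by omega
        simp [this, pvS_self]
      · intro j hj
        rcases Nat.lt_or_ge j (pvStart pp i) with hjl | hjg
        · have h1 := ihn j hjl
          have h2 := pvS_split pp (Nat.le_of_lt hjl) (by omega : pvStart pp i ≤ i + 1)
          omega
        · have h1 := ihp j hjg (by omega)
          have h2 := pvS_split pp hjg (by omega : j ≤ i + 1)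
          omega
    · have hs : pvStart pp (i + 1) = pvStart pp i := by simp [pvStart, hneg]
      rw [hs]
      constructor
      · intro j h1 h2
        rcases Nat.lt_or_ge j (i + 1) with hj | hj
        · exact ihp j h1 (by omega)
        · have : j = i + 1 := by omega
          subst this; omega
      · exact ihn

-- B's fold computes (pvStart, current tank)
lemma pvFoldB (pp : List (List Int)) : ∀ i, i ≤ pp.length →
    ((PySem.List.enumerate (pp.drop i) (i : Int)).foldl
      (fun (st : Int × Int) (ip : Int × List Int) =>
        let tank := st.2 + (PySem.List.pyGetD ip.2 0 0 - PySem.List.pyGetD ip.2 1 0)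
        if tank < 0 then (ip.1 + 1, 0) else (st.1, tank))
      ((pvStart pp i : Int), pvS pp (pvStart pp i) i))
    = ((pvStart pp pp.length : Int), pvS pp (pvStart pp pp.length) pp.length) := by
  intro i hi
  induction h : pp.length - i generalizing i with
  | zero =>
    have : i = pp.length := by omega
    subst this
    simp [List.drop_length]
  | succ n ih =>
    have hlt : i < pp.length := by omega
    rw [List.drop_eq_getElem_cons hlt, PySem.List.enumerate_cons, List.foldl_cons]
    have hrow : pp[i] = pp.getD i [] := (List.getD_eq_getElem pp [] hlt).symm
    have hle := pvStart_le pp i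
    have htank : pvS pp (pvStart pp i) i +
        (PySem.List.pyGetD pp[i] 0 0 - PySem.List.pyGetD pp[i] 1 0)
        = pvS pp (pvStart pp i) (i + 1) := by
      rw [hrow, pvS_succ_top pp hle]; rfl
    simp only [htank]
    by_cases hneg : pvS pp (pvStart pp i) (i + 1) < 0
    · have hs : pvStart pp (i + 1) = i + 1 := by simp [pvStart, hneg]
      have h0 : pvS pp (i + 1) (i + 1) = 0 := pvS_self pp (i + 1)
      simp only [if_pos hneg]
      have := ih (i + 1) (by omega) (by omega)
      rw [hs, h0] at this
      rw [← this]
      norm_num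
    · have hs : pvStart pp (i + 1) = pvStart pp i := by simp [pvStart, hneg]
      simp only [if_neg hneg]
      have := ih (i + 1) (by omega) (by omega)
      rw [hs] at this
      rw [← this]
      norm_num

-- removal phase: while the window sum is negative, A pops the whole window
lemma pvRem (pp : List (List Int)) : ∀ (k : Nat) (f s : Nat) (cur : Int),
    s + k ≤ pp.length → k < pp.length →
    (∀ j, s ≤ j → j < s + k → pvS pp j (s + k) < 0) →
    pvTruckLoop pp (f + k) (k : Int) (s : Int) cur (pvSF pp s (s + k)) (pvSG pp s (s + k))
      = pvTruckLoop pp f 0 ((s + k : Nat) : Int) cur 0 0 := by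
  intro k
  induction k with
  | zero =>
    intro f s cur _ _ _
    simp [pvSF, pvSG]
  | succ k ih =>
    intro f s cur hsk hk hneg
    have hstep : f + (k + 1) = (f + k) + 1 := by omega
    rw [hstep, pvTruckLoop]
    have hc1 : ((k + 1 : Nat) : Int) < (pp.length : Int) := by exact_mod_cast hk
    have hc2 : pvSF pp s (s + (k + 1)) < pvSG pp s (s + (k + 1)) := by
      have := hneg s le_rfl (by omega)
      simp only [pvS] at this; omega
    rw [if_pos hc1, if_pos hc2]
    have harr : s + (k + 1) = s + 1 + k := by omega
    rw [harr]
    have hrow : PySem.List.pyGetD pp ((s : Nat) : Int) [] = pp.getD s [] :=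
      PySem.List.pyGetD_natCast pp s []
    have e1 : ((k + 1 : Nat) : Int) - 1 = ((k : Nat) : Int) := by push_cast; ring
    have e2 : ((s : Nat) : Int) + 1 = ((s + 1 : Nat) : Int) := by push_cast; ring
    have e3 : pvSF pp s (s + 1 + k) - PySem.List.pyGetD (PySem.List.pyGetD pp ((s : Nat) : Int) []) 0 0
        = pvSF pp (s + 1) (s + 1 + k) := by
      rw [hrow]
      have h5 := pvSF_succ_bot pp (show s < s + 1 + k by omega)
      simp only [pvF] at h5
      exact h5
    have e4 : pvSG pp s (s + 1 + k) - PySem.List.pyGetD (PySem.List.pyGetD pp ((s : Nat) : Int) []) 1 0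
        = pvSG pp (s + 1) (s + 1 + k) := by
      rw [hrow]
      have h5 := pvSG_succ_bot pp (show s < s + 1 + k by omega)
      simp only [pvG] at h5
      exact h5
    rw [e1, e2, e3, e4]
    have hsuf : ∀ j, s + 1 ≤ j → j < s + 1 + k → pvS pp j (s + 1 + k) < 0 := by
      intro j h1 h2
      have h3 := hneg j (by omega) (by omega)
      rwa [harr] at h3
    have hih := ih f (s + 1) cur (by omega) (by omega) hsuf
    rw [hih]

-- second sweep: from the final start, past the wrap, no reset happens until the window is full
lemma pvPhase2 (pp : List (List Int)) (htot : 0 ≤ pvS pp 0 pp.length)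
    (hlt : pvStart pp pp.length < pp.length) : ∀ (j f : Nat), j ≤ pvStart pp pp.length →
    pvStart pp pp.length - j + 1 ≤ f →
    pvTruckLoop pp f ((pp.length - pvStart pp pp.length + j : Nat) : Int)
        ((pvStart pp pp.length : Nat) : Int) (j : Int)
        (pvSF pp (pvStart pp pp.length) pp.length + pvSF pp 0 j)
        (pvSG pp (pvStart pp pp.length) pp.length + pvSG pp 0 j)
      = some ((pvStart pp pp.length : Nat) : Int) := by
  have hneg := (pvStart_inv pp pp.length).2
  have hsl := pvStart_le pp pp.length
  have htank2 : ∀ j, j ≤ pvStart pp pp.length →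
      0 ≤ pvS pp (pvStart pp pp.length) pp.length + pvS pp 0 j := by
    intro j hj
    have h1 := pvS_split pp (show (0:Nat) ≤ j by omega) (le_trans hj hsl)
    have h2 := pvS_split pp (show (0:Nat) ≤ pvStart pp pp.length by omega) hsl
    rcases Nat.lt_or_ge j (pvStart pp pp.length) with hlt2 | hge2
    · have h3 := hneg j hlt2
      have h4 := pvS_split pp (Nat.le_of_lt hlt2) hsl
      omega
    · have h0 := pvS_self pp j
      have heq : j = pvStart pp pp.length := by omega
      subst heq
      omega
  intro j f hj hf
  induction hm : pvStart pp pp.length - j generalizing j f with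
  | zero =>
    have : j = pvStart pp pp.length := by omega
    subst this
    obtain ⟨f', rfl⟩ : ∃ f', f = f' + 1 := ⟨f - 1, by omega⟩
    rw [pvTruckLoop]
    have he : pp.length - pvStart pp pp.length + pvStart pp pp.length = pp.length := by omega
    rw [he]
    rw [if_neg (by omega : ¬ ((pp.length : Nat) : Int) < (pp.length : Int))]
  | succ m ih =>
    have hjlt : j < pvStart pp pp.length := by omega
    obtain ⟨f', rfl⟩ : ∃ f', f = f' + 1 := ⟨f - 1, by omega⟩
    rw [pvTruckLoop]
    have hc1 : ((pp.length - pvStart pp pp.length + j : Nat) : Int) < (pp.length : Int) := by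
      have : pp.length - pvStart pp pp.length + j < pp.length := by omega
      exact_mod_cast this
    rw [if_pos hc1]
    have hc2 : ¬ (pvSF pp (pvStart pp pp.length) pp.length + pvSF pp 0 j
        < pvSG pp (pvStart pp pp.length) pp.length + pvSG pp 0 j) := by
      have := htank2 j (by omega)
      simp only [pvS] at this
      omega
    rw [if_neg hc2]
    have hrow : PySem.List.pyGetD pp ((j : Nat) : Int) [] = pp.getD j [] :=
      PySem.List.pyGetD_natCast pp j []
    have e1 : ((pp.length - pvStart pp pp.length + j : Nat) : Int) + 1
        = ((pp.length - pvStart pp pp.length + (j + 1) : Nat) : Int) := by push_cast; ring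
    have e2 : PySem.Int.mod (((j : Nat) : Int) + 1) ((pp.length : Nat) : Int)
        = ((j + 1 : Nat) : Int) := by
      have hcast : ((j : Nat) : Int) + 1 = ((j + 1 : Nat) : Int) := by push_cast; ring
      rw [hcast, PySem.Int.mod_natCast]
      congr 1
      exact Nat.mod_eq_of_lt (by omega)
    have e3 : pvSF pp (pvStart pp pp.length) pp.length + pvSF pp 0 j
          + PySem.List.pyGetD (PySem.List.pyGetD pp ((j : Nat) : Int) []) 0 0
        = pvSF pp (pvStart pp pp.length) pp.length + pvSF pp 0 (j + 1) := by
      rw [hrow, pvSF_succ_top pp (Nat.zero_le j)]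
      simp only [pvF]
      ring
    have e4 : pvSG pp (pvStart pp pp.length) pp.length + pvSG pp 0 j
          + PySem.List.pyGetD (PySem.List.pyGetD pp ((j : Nat) : Int) []) 1 0
        = pvSG pp (pvStart pp pp.length) pp.length + pvSG pp 0 (j + 1) := by
      rw [hrow, pvSG_succ_top pp (Nat.zero_le j)]
      simp only [pvG]
      ring
    rw [e1, e2, e3, e4]
    exact ih (j + 1) f' (by omega) (by omega) (by omega)

-- first sweep: A's loop tracks B's greedy states
lemma pvPhase1 (pp : List (List Int)) (htot : 0 ≤ pvS pp 0 pp.length) : ∀ (i : Nat) (f : Nat),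
    i ≤ pp.length →
    (pp.length - i) + (pvStart pp pp.length - pvStart pp i) + pvStart pp pp.length + 1 ≤ f →
    pvTruckLoop pp f ((i - pvStart pp i : Nat) : Int) ((pvStart pp i : Nat) : Int)
        ((i % pp.length : Nat) : Int) (pvSF pp (pvStart pp i) i) (pvSG pp (pvStart pp i) i)
      = some ((pvStart pp pp.length : Nat) : Int) := by
  intro i f hi hf
  induction hm : pp.length - i generalizing i f with
  | zero =>
    have hieq : i = pp.length := by omega
    subst hieq
    by_cases hn : pp.length = 0
    · obtain ⟨f', rfl⟩ : ∃ f', f = f' + 1 := ⟨f - 1, by omega⟩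
      rw [pvTruckLoop]
      rw [if_neg (by
        have hz := pvStart_le pp pp.length
        have h1 : pp.length - pvStart pp pp.length = 0 := by omega
        rw [h1, hn]
        omega)]
    · have hslt : pvStart pp pp.length < pp.length := by
        rcases Nat.lt_or_ge (pvStart pp pp.length) pp.length with h | h
        · exact h
        · exfalso
          have hle := pvStart_le pp pp.length
          have heq2 : pvStart pp pp.length = pp.length := by omega
          have h3 := (pvStart_inv pp pp.length).2 0 (by omega)
          rw [heq2] at h3
          omega
      have h2 := pvPhase2 pp htot hslt 0 f (by omega) (by omega)
      have e1 : (pp.length - pvStart pp pp.length + 0 : Nat)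
          = pp.length - pvStart pp pp.length := by omega
      have e2 : ((pp.length % pp.length : Nat) : Int) = ((0 : Nat) : Int) := by
        rw [Nat.mod_self]
      have e3 : pvSF pp (pvStart pp pp.length) pp.length + pvSF pp 0 0
          = pvSF pp (pvStart pp pp.length) pp.length := by
        simp [pvSF]
      have e4 : pvSG pp (pvStart pp pp.length) pp.length + pvSG pp 0 0
          = pvSG pp (pvStart pp pp.length) pp.length := by
        simp [pvSG]
      rw [e1, e3, e4] at h2
      rw [e2]
      exact h2
  | succ m ih =>
    have hlt : i < pp.length := by omega
    have hsle : i - pvStart pp i ≤ i := by omega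
    have hsle2 := pvStart_le pp i
    have hsle3 := pvStart_le pp pp.length
    have hmono := pvStart_mono pp (show i ≤ pp.length by omega)
    obtain ⟨f', rfl⟩ : ∃ f', f = f' + 1 := ⟨f - 1, by omega⟩
    rw [pvTruckLoop]
    rw [if_pos (by exact_mod_cast (show i - pvStart pp i < pp.length by omega) :
        ((i - pvStart pp i : Nat) : Int) < (pp.length : Int))]
    have hc2 : ¬ (pvSF pp (pvStart pp i) i < pvSG pp (pvStart pp i) i) := by
      have h0 := (pvStart_inv pp i).1 i hsle2 le_rfl
      simp only [pvS] at h0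
      omega
    rw [if_neg hc2]
    have hmod : i % pp.length = i := Nat.mod_eq_of_lt hlt
    have hrow : PySem.List.pyGetD pp ((i % pp.length : Nat) : Int) [] = pp.getD i [] := by
      rw [hmod]; exact PySem.List.pyGetD_natCast pp i []
    have e1 : ((i - pvStart pp i : Nat) : Int) + 1 = ((i + 1 - pvStart pp i : Nat) : Int) := by
      have : i + 1 - pvStart pp i = (i - pvStart pp i) + 1 := by omega
      rw [this]; push_cast; ring
    have e2 : PySem.Int.mod (((i % pp.length : Nat) : Int) + 1) ((pp.length : Nat) : Int)
        = (((i + 1) % pp.length : Nat) : Int) := by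
      rw [hmod]
      have hcast : ((i : Nat) : Int) + 1 = ((i + 1 : Nat) : Int) := by push_cast; ring
      rw [hcast, PySem.Int.mod_natCast]
    have e3 : pvSF pp (pvStart pp i) i
          + PySem.List.pyGetD (PySem.List.pyGetD pp ((i % pp.length : Nat) : Int) []) 0 0
        = pvSF pp (pvStart pp i) (i + 1) := by
      rw [hrow, pvSF_succ_top pp hsle2]; rfl
    have e4 : pvSG pp (pvStart pp i) i
          + PySem.List.pyGetD (PySem.List.pyGetD pp ((i % pp.length : Nat) : Int) []) 1 0
        = pvSG pp (pvStart pp i) (i + 1) := by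
      rw [hrow, pvSG_succ_top pp hsle2]; rfl
    rw [e1, e2, e3, e4]
    by_cases hneg2 : pvS pp (pvStart pp i) (i + 1) < 0
    · have hs1 : pvStart pp (i + 1) = i + 1 := by simp [pvStart, hneg2]
      have hmono2 : i + 1 ≤ pvStart pp pp.length := by
        have := pvStart_mono pp (show i + 1 ≤ pp.length by omega)
        omega
      have hk_lt : i + 1 - pvStart pp i < pp.length := by
        rcases Nat.lt_or_ge (i + 1 - pvStart pp i) pp.length with h | h
        · exact h
        · exfalso
          have hs0 : pvStart pp i = 0 := by omega
          have hin : i + 1 = pp.length := by omega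
          rw [hs0, hin] at hneg2
          omega
      have harr : pvStart pp i + (i + 1 - pvStart pp i) = i + 1 := by omega
      have hsuf : ∀ j, pvStart pp i ≤ j → j < pvStart pp i + (i + 1 - pvStart pp i) →
          pvS pp j (pvStart pp i + (i + 1 - pvStart pp i)) < 0 := by
        intro j h1 h2
        rw [harr]
        rcases Nat.eq_or_lt_of_le h1 with heq | hlt3
        · rw [← heq]; exact hneg2
        · have hp := (pvStart_inv pp i).1 j h1 (by omega)
          have hsp := pvS_split pp h1 (show j ≤ i + 1 by omega)
          omega
      obtain ⟨f2, rfl⟩ : ∃ f2, f' = f2 + (i + 1 - pvStart pp i) :=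
        ⟨f' - (i + 1 - pvStart pp i), by omega⟩
      have hrem := pvRem pp (i + 1 - pvStart pp i) f2 (pvStart pp i)
        (((i + 1) % pp.length : Nat) : Int) (by omega) hk_lt hsuf
      rw [harr] at hrem
      rw [hrem]
      have hihgoal := ih (i + 1) f2 (by omega) (by omega) (by omega)
      rw [hs1] at hihgoal
      have hz1 : ((i + 1 - (i + 1) : Nat) : Int) = 0 := by norm_num
      have hz2 : pvSF pp (i + 1) (i + 1) = 0 := by simp [pvSF]
      have hz3 : pvSG pp (i + 1) (i + 1) = 0 := by simp [pvSG]
      rw [hz1, hz2, hz3] at hihgoal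
      exact hihgoal
    · have hs1 : pvStart pp (i + 1) = pvStart pp i := by simp [pvStart, hneg2]
      have hihgoal := ih (i + 1) f' (by omega) (by rw [hs1]; omega) (by omega)
      rw [hs1] at hihgoal
      exact hihgoal

lemma pvMapSum (pp : List (List Int)) (f : List Int → Int) :
    (pp.map f).sum = ∑ j ∈ Finset.Ico 0 pp.length, f (pp.getD j []) := by
  rw [← Finset.range_eq_Ico]
  induction pp with
  | nil => simp
  | cons x t ih =>
    simp [List.map_cons, List.sum_cons, ih, List.length_cons, Finset.sum_range_succ']
    ring

-- ===== VERDICT (by name: the statement is the Claim_ definition above) =====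
theorem truckTour_spec : Claim_equal_truckTour := by
  intro pp _hdom _hpre
  unfold Spec_truckTour truckTour truckTour_alt
  show (if (pp.map (fun i => PySem.List.pyGetD i 0 0)).sum < (pp.map (fun i => PySem.List.pyGetD i 1 0)).sum
      then (-1 : Int)
      else (pvTruckLoop pp (3 * pp.length + 1) 0 0 0 0 0).getD 0)
    = (if (pp.map (fun i => PySem.List.pyGetD i 0 0)).sum < (pp.map (fun i => PySem.List.pyGetD i 1 0)).sum
      then (-1 : Int)
      else ((PySem.List.enumerate pp 0).foldl
        (fun (st : Int × Int) (ip : Int × List Int) =>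
          let tank := st.2 + (PySem.List.pyGetD ip.2 0 0 - PySem.List.pyGetD ip.2 1 0)
          if tank < 0 then (ip.1 + 1, 0) else (st.1, tank))
        (0, 0)).1)
  by_cases hg : (pp.map (fun i => PySem.List.pyGetD i 0 0)).sum < (pp.map (fun i => PySem.List.pyGetD i 1 0)).sum
  · rw [if_pos hg, if_pos hg]
  · rw [if_neg hg, if_neg hg]
    have htf : (pp.map (fun i => PySem.List.pyGetD i 0 0)).sum = pvSF pp 0 pp.length := by
      rw [pvMapSum]; rfl
    have htd : (pp.map (fun i => PySem.List.pyGetD i 1 0)).sum = pvSG pp 0 pp.length := by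
      rw [pvMapSum]; rfl
    rw [htf, htd] at hg
    have htot : 0 ≤ pvS pp 0 pp.length := by
      simp only [pvS]; omega
    have hsl := pvStart_le pp pp.length
    have hA := pvPhase1 pp htot 0 (3 * pp.length + 1) (by omega) (by omega)
    have hs0 : pvStart pp 0 = 0 := rfl
    rw [hs0] at hA
    have hz1 : ((0 - 0 : Nat) : Int) = 0 := by norm_num
    have hz3 : ((0 % pp.length : Nat) : Int) = 0 := by rw [Nat.zero_mod]; rfl
    have hz4 : pvSF pp 0 0 = 0 := by simp [pvSF]
    have hz5 : pvSG pp 0 0 = 0 := by simp [pvSG]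
    rw [hz1, hz3, hz4, hz5] at hA
    rw [hA]
    have hB := pvFoldB pp 0 (by omega)
    rw [hs0] at hB
    have hz6 : pvS pp 0 0 = 0 := pvS_self pp 0
    rw [hz6] at hB
    simp only [List.drop_zero, Nat.cast_zero] at hB
    rw [hB]
    rfl
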